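-- pv_equiv track=rewrite | github.com/tytuseczek/portfolio | lacan_pos/fiscal_posnet_thermal.py | add_control_sum
-- ===== SOURCE A (Python) =====
-- def add_control_sum(l):
--     """
--     Funkcja oblicza i dodaje do rozkazu jego sumę kontrolną
--     @param l: String rozkazu
--     @return r - Rozkaz z sumą kontrolną rozkazu poprzedzona hashem (#) - wynik w formie bitów
--     """
--
--     crc16htab=[0x00,0x10,0x20,0x30,0x40,0x50,0x60,0x70,
--                0x81,0x91,0xa1,0xb1,0xc1,0xd1,0xe1,0xf1,
--                0x12,0x02,0x32,0x22,0x52,0x42,0x72,0x62,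
--                0x93,0x83,0xb3,0xa3,0xd3,0xc3,0xf3,0xe3,
--                0x24,0x34,0x04,0x14,0x64,0x74,0x44,0x54,
--                0xa5,0xb5,0x85,0x95,0xe5,0xf5,0xc5,0xd5,
--                0x36,0x26,0x16,0x06,0x76,0x66,0x56,0x46,
--                0xb7,0xa7,0x97,0x87,0xf7,0xe7,0xd7,0xc7,
--                0x48,0x58,0x68,0x78,0x08,0x18,0x28,0x38,
--                0xc9,0xd9,0xe9,0xf9,0x89,0x99,0xa9,0xb9,
--                0x5a,0x4a,0x7a,0x6a,0x1a,0x0a,0x3a,0x2a,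
--                0xdb,0xcb,0xfb,0xeb,0x9b,0x8b,0xbb,0xab,
--                0x6c,0x7c,0x4c,0x5c,0x2c,0x3c,0x0c,0x1c,
--                0xed,0xfd,0xcd,0xdd,0xad,0xbd,0x8d,0x9d,
--                0x7e,0x6e,0x5e,0x4e,0x3e,0x2e,0x1e,0x0e,
--                0xff,0xef,0xdf,0xcf,0xbf,0xaf,0x9f,0x8f,
--                0x91,0x81,0xb1,0xa1,0xd1,0xc1,0xf1,0xe1,
--                0x10,0x00,0x30,0x20,0x50,0x40,0x70,0x60,
--                0x83,0x93,0xa3,0xb3,0xc3,0xd3,0xe3,0xf3,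
--                0x02,0x12,0x22,0x32,0x42,0x52,0x62,0x72,
--                0xb5,0xa5,0x95,0x85,0xf5,0xe5,0xd5,0xc5,
--                0x34,0x24,0x14,0x04,0x74,0x64,0x54,0x44,
--                0xa7,0xb7,0x87,0x97,0xe7,0xf7,0xc7,0xd7,
--                0x26,0x36,0x06,0x16,0x66,0x76,0x46,0x56,
--                0xd9,0xc9,0xf9,0xe9,0x99,0x89,0xb9,0xa9,
--                0x58,0x48,0x78,0x68,0x18,0x08,0x38,0x28,
--                0xcb,0xdb,0xeb,0xfb,0x8b,0x9b,0xab,0xbb,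
--                0x4a,0x5a,0x6a,0x7a,0x0a,0x1a,0x2a,0x3a,
--                0xfd,0xed,0xdd,0xcd,0xbd,0xad,0x9d,0x8d,
--                0x7c,0x6c,0x5c,0x4c,0x3c,0x2c,0x1c,0x0c,
--                0xef,0xff,0xcf,0xdf,0xaf,0xbf,0x8f,0x9f,
--                0x6e,0x7e,0x4e,0x5e,0x2e,0x3e,0x0e,0x1e]
--
--     crc161tab=[0x00,0x21,0x42,0x63,0x84,0xa5,0xc6,0xe7,
--                0x08,0x29,0x4a,0x6b,0x8c,0xad,0xce,0xef,
--                0x31,0x10,0x73,0x52,0xb5,0x94,0xf7,0xd6,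
--                0x39,0x18,0x7b,0x5a,0xbd,0x9c,0xff,0xde,
--                0x62,0x43,0x20,0x01,0xe6,0xc7,0xa4,0x85,
--                0x6a,0x4b,0x28,0x09,0xee,0xcf,0xac,0x8d,
--                0x53,0x72,0x11,0x30,0xd7,0xf6,0x95,0xb4,
--                0x5b,0x7a,0x19,0x38,0xdf,0xfe,0x9d,0xbc,
--                0xc4,0xe5,0x86,0xa7,0x40,0x61,0x02,0x23,
--                0xcc,0xed,0x8e,0xaf,0x48,0x69,0x0a,0x2b,
--                0xf5,0xd4,0xb7,0x96,0x71,0x50,0x33,0x12,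
--                0xfd,0xdc,0xbf,0x9e,0x79,0x58,0x3b,0x1a,
--                0xa6,0x87,0xe4,0xc5,0x22,0x03,0x60,0x41,
--                0xae,0x8f,0xec,0xcd,0x2a,0x0b,0x68,0x49,
--                0x97,0xb6,0xd5,0xf4,0x13,0x32,0x51,0x70,
--                0x9f,0xbe,0xdd,0xfc,0x1b,0x3a,0x59,0x78,
--                0x88,0xa9,0xca,0xeb,0x0c,0x2d,0x4e,0x6f,
--                0x80,0xa1,0xc2,0xe3,0x04,0x25,0x46,0x67,
--                0xb9,0x98,0xfb,0xda,0x3d,0x1c,0x7f,0x5e,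
--                0xb1,0x90,0xf3,0xd2,0x35,0x14,0x77,0x56,
--                0xea,0xcb,0xa8,0x89,0x6e,0x4f,0x2c,0x0d,
--                0xe2,0xc3,0xa0,0x81,0x66,0x47,0x24,0x05,
--                0xdb,0xfa,0x99,0xb8,0x5f,0x7e,0x1d,0x3c,
--                0xd3,0xf2,0x91,0xb0,0x57,0x76,0x15,0x34,
--                0x4c,0x6d,0x0e,0x2f,0xc8,0xe9,0x8a,0xab,
--                0x44,0x65,0x06,0x27,0xc0,0xe1,0x82,0xa3,
--                0x7d,0x5c,0x3f,0x1e,0xf9,0xd8,0xbb,0x9a,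
--                0x75,0x54,0x37,0x16,0xf1,0xd0,0xb3,0x92,
--                0x2e,0x0f,0x6c,0x4d,0xaa,0x8b,0xe8,0xc9,
--                0x26,0x07,0x64,0x45,0xa2,0x83,0xe0,0xc1,
--                0x1f,0x3e,0x5d,0x7c,0x9b,0xba,0xd9,0xf8,
--                0x17,0x36,0x55,0x74,0x93,0xb2,0xd1,0xf0]
--     hi=0
--     lo=0
--     for i in l:
--         index = hi^i
--         hi = lo^crc16htab[index]
--         lo = crc161tab[index]
--
--     hi2=((hi<<8)|lo)
--     r1="%04X" % hi2
--
--     #tłumaczenie hex na bit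
--     suma_bit=[]
--     for znak in r1:
--         d = ord(znak)
--         suma_bit.append(d)
--     r=l+[ord('#')]+suma_bit
--     return r
-- ===== SOURCE B (Python) =====
-- def add_control_sum(l):
--     """Bitwise CRC16-CCITT (poly 0x1021, init 0) instead of 512-entry lookup tables;
--     bytes are taken mod 256, matching A's table indexing (incl. negative-index wrap)."""
--     crc = 0
--     for i in l:
--         crc ^= (i % 256) << 8
--         for _ in range(8):
--             if crc & 0x8000:
--                 crc = ((crc << 1) ^ 0x1021) & 0xFFFF
--             else:
--                 crc = (crc << 1) & 0xFFFF
--     suma_bit = [ord(znak) for znak in "%04X" % crc]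
--     return l + [ord('#')] + suma_bit
-- ===== Notes on version B (the rewrite author's own statement) =====
-- stated objective: simpler
-- what changed: Replaces A's two 256-entry CRC lookup tables and split hi/lo byte state with the direct bitwise CRC16-CCITT computation: one 16-bit accumulator updated by crc ^= (i % 256) << 8 and eight shift/xor rounds per byte.
import Mathlib
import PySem

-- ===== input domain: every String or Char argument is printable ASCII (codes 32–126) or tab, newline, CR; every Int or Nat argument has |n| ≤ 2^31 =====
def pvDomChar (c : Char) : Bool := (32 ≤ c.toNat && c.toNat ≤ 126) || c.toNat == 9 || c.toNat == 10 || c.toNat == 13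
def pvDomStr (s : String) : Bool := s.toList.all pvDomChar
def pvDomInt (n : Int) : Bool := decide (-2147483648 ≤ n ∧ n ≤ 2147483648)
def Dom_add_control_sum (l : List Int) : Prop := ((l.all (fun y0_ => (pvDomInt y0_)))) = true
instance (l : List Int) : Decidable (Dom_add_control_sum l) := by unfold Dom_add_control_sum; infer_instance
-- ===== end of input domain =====

-- B replaces A's two 256-entry CRC lookup tables and split hi/lo byte state by the direct
-- bitwise CRC16-CCITT computation (8 shift/xor rounds per byte on one 16-bit accumulator): simpler.

-- ===== PORT A =====
-- "%04X" % n followed by the ord() loop: the four hex-digit character codes of n (exact for 0 ≤ n < 2^16,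
-- which holds for every checksum both programs build); shared by both ports, as both Pythons format this way.
def pvHexOrd (d : Nat) : Int := if d < 10 then ((48 + d : Nat) : Int) else ((55 + d : Nat) : Int)
def pvHex4 (n : Nat) : List Int :=
  [pvHexOrd (n / 4096 % 16), pvHexOrd (n / 256 % 16), pvHexOrd (n / 16 % 16), pvHexOrd (n % 16)]

def pvHtab : List Int := [0,16,32,48,64,80,96,112,129,145,161,177,193,209,225,241,18,2,50,34,82,66,114,98,147,131,179,163,211,195,243,227,36,52,4,20,100,116,68,84,165,181,133,149,229,245,197,213,54,38,22,6,118,102,86,70,183,167,151,135,247,231,215,199,72,88,104,120,8,24,40,56,201,217,233,249,137,153,169,185,90,74,122,106,26,10,58,42,219,203,251,235,155,139,187,171,108,124,76,92,44,60,12,28,237,253,205,221,173,189,141,157,126,110,94,78,62,46,30,14,255,239,223,207,191,175,159,143,145,129,177,161,209,193,241,225,16,0,48,32,80,64,112,96,131,147,163,179,195,211,227,243,2,18,34,50,66,82,98,114,181,165,149,133,245,229,213,197,52,36,20,4,116,100,84,68,167,183,135,151,231,247,199,215,38,54,6,22,102,118,70,86,217,201,249,233,153,137,185,169,88,72,120,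104,24,8,56,40,203,219,235,251,139,155,171,187,74,90,106,122,10,26,42,58,253,237,221,205,189,173,157,141,124,108,92,76,60,44,28,12,239,255,207,223,175,191,143,159,110,126,78,94,46,62,14,30]
def pvLtab : List Int := [0,33,66,99,132,165,198,231,8,41,74,107,140,173,206,239,49,16,115,82,181,148,247,214,57,24,123,90,189,156,255,222,98,67,32,1,230,199,164,133,106,75,40,9,238,207,172,141,83,114,17,48,215,246,149,180,91,122,25,56,223,254,157,188,196,229,134,167,64,97,2,35,204,237,142,175,72,105,10,43,245,212,183,150,113,80,51,18,253,220,191,158,121,88,59,26,166,135,228,197,34,3,96,65,174,143,236,205,42,11,104,73,151,182,213,244,19,50,81,112,159,190,221,252,27,58,89,120,136,169,202,235,12,45,78,111,128,161,194,227,4,37,70,103,185,152,251,218,61,28,127,94,177,144,243,210,53,20,119,86,234,203,168,137,110,79,44,13,226,195,160,129,102,71,36,5,219,250,153,184,95,126,29,60,211,242,145,176,87,118,21,52,76,109,14,47,200,233,138,171,68,101,6,39,192,225,130,163,125,92,63,30,249,216,187,154,117,84,55,22,241,208,179,146,46,15,108,77,170,139,232,201,38,7,100,69,162,131,224,193,3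1,62,93,124,155,186,217,248,23,54,85,116,147,178,209,240]

-- the 'for i in l' loop of A: index = hi^i, hi = lo^crc16htab[index], lo = crc161tab[index];
-- none = IndexError (table index out of range)
def pvALoop : List Int → Int → Int → Option (Int × Int)
  | [], hi, lo => some (hi, lo)
  | i :: rest, hi, lo =>
    let index := PySem.Int.bxor hi i
    match PySem.List.pyGet? pvHtab index, PySem.List.pyGet? pvLtab index with
    | some h, some t => pvALoop rest (PySem.Int.bxor lo h) t
    | _, _ => none

def add_control_sum (l : List Int) : List Int :=
  match pvALoop l 0 0 with
  | some (hi, lo) => l ++ [35] ++ pvHex4 ((PySem.Int.bor (hi <<< (8 : Nat)) lo).toNat)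
  | none => []   -- unreachable under Pre_ (A raises IndexError there)

-- ===== PORT B =====
-- one round of 'for _ in range(8)': crc = ((crc<<1)^0x1021)&0xFFFF if crc&0x8000 else (crc<<1)&0xFFFF
def pvRound (crc : Nat) : Nat :=
  if crc &&& 0x8000 ≠ 0 then ((crc <<< 1) ^^^ 0x1021) &&& 0xFFFF else (crc <<< 1) &&& 0xFFFF

def pvRounds8 (crc : Nat) : Nat := (PySem.List.pyRange 0 8 1).foldl (fun c _ => pvRound c) crc

-- the 'for i in l' loop of B: crc ^= (i % 256) << 8, then 8 rounds; crc is a Python int that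
-- stays in [0, 0xFFFF], modelled as Nat ((i % 256) is nonnegative: positive divisor)
def pvBLoop : List Int → Nat → Nat
  | [], crc => crc
  | i :: rest, crc => pvBLoop rest (pvRounds8 (crc ^^^ ((PySem.Int.mod i 256).toNat <<< 8)))

def add_control_sum_alt (l : List Int) : List Int :=
  l ++ [35] ++ pvHex4 (pvBLoop l 0)

-- ===== PRECONDITION & SPEC =====
-- Pre_ excludes exactly the inputs on which A raises IndexError: an element below -256 or above 255
-- makes the table index hi^i fall outside the 256-entry tables (negative indices down to -256 wrap).
def Pre_add_control_sum (l : List Int) : Prop := ∀ i ∈ l, -256 ≤ i ∧ i ≤ 255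
instance (l : List Int) : Decidable (Pre_add_control_sum l) := by unfold Pre_add_control_sum; infer_instance
def pvWitness_add_control_sum : List Int := [80, 36]

def Spec_add_control_sum (l : List Int) (out : List Int) : Prop := out = add_control_sum_alt l
instance (l : List Int) (out : List Int) : Decidable (Spec_add_control_sum l out) := by unfold Spec_add_control_sum; infer_instance

-- ===== CLAIM (what is proved, stated in full; the proofs are below) =====
def Claim_equal_add_control_sum : Prop := ∀ (l : List Int), Dom_add_control_sum l → Pre_add_control_sum l → Spec_add_control_sum l (add_control_sum l)

-- ===== LEMMAS AND PROOFS =====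
-- Nat views of the tables (proof-side only)
def pvHN (idx : Nat) : Nat := (pvHtab.getD idx 0).toNat
def pvLN (idx : Nat) : Nat := (pvLtab.getD idx 0).toNat

-- the byte-step table identity: 8 bitwise rounds on idx<<8 compute exactly the two table entries
set_option maxHeartbeats 2000000 in
set_option maxRecDepth 100000 in
theorem pvTab : ∀ idx < 256, pvRounds8 (idx <<< 8) = (pvHN idx <<< 8) ^^^ pvLN idx ∧ pvHN idx < 256 ∧ pvLN idx < 256 := by decide

set_option maxHeartbeats 2000000 in
set_option maxRecDepth 100000 in
theorem pvGetTab : ∀ idx < 256, pvHtab[idx]? = some ((pvHN idx : Nat) : Int) ∧ pvLtab[idx]? = some ((pvLN idx : Nat) : Int) := by decide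

set_option maxRecDepth 10000 in
theorem pvComp255 : ∀ m < 256, 255 - m = 255 ^^^ m := by decide

theorem pvXorLt (a b : Nat) (ha : a < 256) (hb : b < 256) : a ^^^ b < 256 := by
  have := Nat.xor_lt_two_pow (x := a) (y := b) (n := 8) (by omega) (by omega)
  omega

theorem pvComp (h : Nat) (hh : h < 256) (n : Nat) (hn : n < 256) :
    255 - (h ^^^ n) = h ^^^ (255 - n) := by
  rw [pvComp255 _ (pvXorLt h n hh hn), pvComp255 _ hn,
      ← Nat.xor_assoc, Nat.xor_comm 255 h, Nat.xor_assoc]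

theorem pvXsh (a b c : Nat) : a ^^^ b ^^^ c = a ^^^ c ^^^ b := by
  rw [Nat.xor_assoc, Nat.xor_comm b c, ← Nat.xor_assoc]

theorem pvMaskId {a : Nat} (h : a < 65536) : a &&& 65535 = a := by
  apply Nat.eq_of_testBit_eq; intro i
  rw [Nat.testBit_and, show (65535:Nat) = 2^16-1 from rfl, Nat.testBit_two_pow_sub_one]
  by_cases hi : i < 16
  · simp [hi]
  · have h2 : (65536:Nat) ≤ 2^i := by
      calc (65536:Nat) = 2^16 := rfl
      _ ≤ 2^i := Nat.pow_le_pow_right (by omega) (by omega)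
    simp [hi, Nat.testBit_lt_two_pow (by omega : a < 2^i)]

theorem pvRounds8_eq (x : Nat) : pvRounds8 x =
    pvRound (pvRound (pvRound (pvRound (pvRound (pvRound (pvRound (pvRound x))))))) := rfl

-- the low bits never reach the tested top bit within one byte's rounds
theorem pvRoundLin (x y : Nat) (hy : y < 32768) :
    pvRound (x ^^^ y) = pvRound x ^^^ (y <<< 1) := by
  have h15 : y.testBit 15 = false := Nat.testBit_lt_two_pow (by omega : y < 2 ^ 15)
  have hbit : (x ^^^ y) &&& 32768 = x &&& 32768 := by
    rw [show (32768:Nat) = 2^15 from rfl, Nat.and_two_pow, Nat.and_two_pow,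
        Nat.testBit_xor, h15, Bool.xor_false]
  have hmask : (y <<< 1) &&& 65535 = y <<< 1 := pvMaskId (by simp [Nat.shiftLeft_eq]; omega)
  unfold pvRound
  rw [hbit]
  split_ifs with hc
  · rw [Nat.shiftLeft_xor_distrib, pvXsh, Nat.and_xor_distrib_right, hmask]
  · rw [Nat.shiftLeft_xor_distrib, Nat.and_xor_distrib_right, hmask]

theorem pvL1 (x o : Nat) (ho : o < 256) :
    pvRounds8 (x ^^^ o) = pvRounds8 x ^^^ (o <<< 8) := by
  rw [pvRounds8_eq, pvRounds8_eq,
      pvRoundLin _ o (by omega),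
      pvRoundLin _ (o <<< 1) (by simp [Nat.shiftLeft_eq]; omega),
      pvRoundLin _ (o <<< 1 <<< 1) (by simp [Nat.shiftLeft_eq]; omega),
      pvRoundLin _ (o <<< 1 <<< 1 <<< 1) (by simp [Nat.shiftLeft_eq]; omega),
      pvRoundLin _ (o <<< 1 <<< 1 <<< 1 <<< 1) (by simp [Nat.shiftLeft_eq]; omega),
      pvRoundLin _ (o <<< 1 <<< 1 <<< 1 <<< 1 <<< 1) (by simp [Nat.shiftLeft_eq]; omega),
      pvRoundLin _ (o <<< 1 <<< 1 <<< 1 <<< 1 <<< 1 <<< 1) (by simp [Nat.shiftLeft_eq]; omega),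
      pvRoundLin _ (o <<< 1 <<< 1 <<< 1 <<< 1 <<< 1 <<< 1 <<< 1) (by simp [Nat.shiftLeft_eq]; omega),
      show o <<< 1 <<< 1 <<< 1 <<< 1 <<< 1 <<< 1 <<< 1 <<< 1 = o <<< 8 by
        simp [Nat.shiftLeft_eq]; ring]

theorem pvBstep (h o j : Nat) (hh : h < 256) (ho : o < 256) (hj : j < 256) :
    pvRounds8 (((h <<< 8) ^^^ o) ^^^ (j <<< 8)) = ((o ^^^ pvHN (h ^^^ j)) <<< 8) ^^^ pvLN (h ^^^ j) := by
  have hidx : h ^^^ j < 256 := pvXorLt h j hh hj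
  have e1 : ((h <<< 8) ^^^ o) ^^^ (j <<< 8) = ((h ^^^ j) <<< 8) ^^^ o := by
    rw [pvXsh, ← Nat.shiftLeft_xor_distrib]
  rw [e1, pvL1 _ o ho, (pvTab (h ^^^ j) hidx).1, pvXsh, Nat.shiftLeft_xor_distrib,
      Nat.xor_comm (pvHN (h ^^^ j) <<< 8) (o <<< 8)]

set_option maxRecDepth 10000 in
theorem pvHlen : pvHtab.length = 256 := by decide
set_option maxRecDepth 10000 in
theorem pvLlen : pvLtab.length = 256 := by decide

theorem pvAstep (h : Nat) (hh : h < 256) (i : Int) (h1 : -256 ≤ i) (h2 : i ≤ 255) :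
    PySem.List.pyGet? pvHtab (PySem.Int.bxor (h : Int) i) = some ((pvHN (h ^^^ (PySem.Int.mod i 256).toNat) : Nat) : Int) ∧
    PySem.List.pyGet? pvLtab (PySem.Int.bxor (h : Int) i) = some ((pvLN (h ^^^ (PySem.Int.mod i 256).toNat) : Nat) : Int) ∧
    (PySem.Int.mod i 256).toNat < 256 := by
  by_cases hi0 : 0 ≤ i
  · have hmv : PySem.Int.mod i 256 = i := by
      rw [PySem.Int.mod_eq_emod_of_pos (by norm_num)]; omega
    have hjv : (PySem.Int.mod i 256).toNat = i.toNat := by rw [hmv]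
    have hx : PySem.Int.bxor (h : Int) i = ((h ^^^ i.toNat : Nat) : Int) := by
      have := PySem.Int.bxor_of_nonneg (a := (h : Int)) (b := i) (by positivity) hi0
      simpa using this
    have hlt : h ^^^ i.toNat < 256 := pvXorLt h i.toNat hh (by omega)
    obtain ⟨g1, g2⟩ := pvGetTab (h ^^^ i.toNat) hlt
    rw [hjv, hx, PySem.List.pyGet?_natCast, PySem.List.pyGet?_natCast]
    exact ⟨g1, g2, by omega⟩
  · replace hi0 : i < 0 := by omega
    have hn2 : (-i - 1).toNat < 256 := by omega
    have hx : PySem.Int.bxor (h : Int) i = -((h ^^^ (-i - 1).toNat : Nat) : Int) - 1 := by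
      unfold PySem.Int.bxor
      rw [if_pos (by positivity), if_neg (by omega)]
      simp
    have hxk : h ^^^ (-i - 1).toNat < 256 := pvXorLt h _ hh hn2
    have hjv : (PySem.Int.mod i 256).toNat = 255 - (-i - 1).toNat := by
      have : PySem.Int.mod i 256 = i + 256 := by
        rw [PySem.Int.mod_eq_emod_of_pos (by norm_num)]; omega
      rw [this]; omega
    have hcast : (-((h ^^^ (-i - 1).toNat : Nat) : Int) - 1) = -(((h ^^^ (-i - 1).toNat) + 1 : Nat) : Int) := by
      push_cast; ring
    have hcomp : 255 - (h ^^^ (-i - 1).toNat) = h ^^^ (255 - (-i - 1).toNat) := pvComp h hh _ hn2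
    have hidx2 : pvHtab.length - ((h ^^^ (-i - 1).toNat) + 1) = h ^^^ (255 - (-i - 1).toNat) := by
      rw [pvHlen]; omega
    have hidx3 : pvLtab.length - ((h ^^^ (-i - 1).toNat) + 1) = h ^^^ (255 - (-i - 1).toNat) := by
      rw [pvLlen]; omega
    obtain ⟨g1, g2⟩ := pvGetTab (h ^^^ (255 - (-i - 1).toNat)) (pvXorLt h _ hh (by omega))
    rw [hjv, hx, hcast,
        PySem.List.pyGet?_neg_natCast pvHtab _ (by omega) (by rw [pvHlen]; omega),
        PySem.List.pyGet?_neg_natCast pvLtab _ (by omega) (by rw [pvLlen]; omega),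
        hidx2, hidx3]
    exact ⟨g1, g2, by omega⟩

theorem pvInv : ∀ (l : List Int), (∀ i ∈ l, -256 ≤ i ∧ i ≤ 255) → ∀ h o : Nat, h < 256 → o < 256 →
    ∃ h' o' : Nat, h' < 256 ∧ o' < 256 ∧ pvALoop l (h : Int) (o : Int) = some ((h' : Int), (o' : Int)) ∧
      pvBLoop l ((h <<< 8) ^^^ o) = (h' <<< 8) ^^^ o' := by
  intro l
  induction l with
  | nil => exact fun _ h o hh ho => ⟨h, o, hh, ho, rfl, rfl⟩
  | cons i rest ih =>
    intro hpre h o hh ho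
    obtain ⟨hi1, hi2⟩ := hpre i (List.mem_cons_self ..)
    obtain ⟨g1, g2, hj⟩ := pvAstep h hh i hi1 hi2
    have hidx : h ^^^ (PySem.Int.mod i 256).toNat < 256 := pvXorLt h _ hh hj
    obtain ⟨-, hHb, hLb⟩ := pvTab (h ^^^ (PySem.Int.mod i 256).toNat) hidx
    obtain ⟨h', o', hb1, hb2, hA, hB⟩ :=
      ih (fun x hx => hpre x (List.mem_cons_of_mem _ hx))
        (o ^^^ pvHN (h ^^^ (PySem.Int.mod i 256).toNat))
        (pvLN (h ^^^ (PySem.Int.mod i 256).toNat))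
        (pvXorLt o _ ho hHb) hLb
    refine ⟨h', o', hb1, hb2, ?_, ?_⟩
    · show pvALoop (i :: rest) (h : Int) (o : Int) = some ((h' : Int), (o' : Int))
      simp only [pvALoop, g1, g2, PySem.Int.bxor_natCast]
      exact hA
    · show pvBLoop (i :: rest) ((h <<< 8) ^^^ o) = (h' <<< 8) ^^^ o'
      simp only [pvBLoop]
      rw [pvBstep h o _ hh ho hj]
      exact hB

theorem pvLorXor (a b : Nat) (h : b < 256) : (a <<< 8) ||| b = (a <<< 8) ^^^ b := by
  apply Nat.eq_of_testBit_eq; intro i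
  simp only [Nat.testBit_or, Nat.testBit_xor, Nat.testBit_shiftLeft]
  by_cases hi : 8 ≤ i
  · have h2 : (256:Nat) ≤ 2^i := by
      calc (256:Nat) = 2^8 := rfl
      _ ≤ 2^i := Nat.pow_le_pow_right (by omega) (by omega)
    simp [hi, Nat.testBit_lt_two_pow (by omega : b < 2^i)]
  · simp [hi]

-- ===== VERDICT (by name: the statement is the Claim_ definition above) =====
theorem add_control_sum_spec : Claim_equal_add_control_sum := by
  intro l _ hpre
  unfold Spec_add_control_sum add_control_sum add_control_sum_alt
  obtain ⟨h', o', hb1, hb2, hA, hB⟩ := pvInv l hpre 0 0 (by omega) (by omega)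
  have hA' : pvALoop l 0 0 = some ((h' : Int), (o' : Int)) := by simpa using hA
  have hB' : pvBLoop l 0 = (h' <<< 8) ^^^ o' := by simpa using hB
  have e1 : ((h' : Int) <<< (8 : Nat)) = ((h' <<< 8 : Nat) : Int) := rfl
  have e2 : PySem.Int.bor ((h' : Int) <<< (8 : Nat)) ((o' : Int)) = ((h' <<< 8 ||| o' : Nat) : Int) := by
    rw [e1, PySem.Int.bor_natCast]
  rw [hA', hB']
  simp [e2, pvLorXor h' o' hb2]
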